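-- pv_equiv track=rewrite | github.com/KingArthuritus/rubiks_app | solver_engine.py | _cancel_moves
-- ===== SOURCE A (Python) =====
-- def _invert_move(m: str) -> str:
--     if m.endswith("2"): return m
--     if m.endswith("'"): return m[0]
--     return m + "'"
--
-- def _cancel_moves(seq: list[str]) -> list[str]:
--     out: list[str] = []
--     for m in seq:
--         if out and _invert_move(m) == out[-1]:
--             out.pop()
--         else:
--             out.append(m)
--     return out
-- ===== SOURCE B (Python) =====
-- def _invert_move(m: str) -> str:
--     if m.endswith("2"): return m
--     if m.endswith("'"): return m[0]
--     return m + "'"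
--
-- def _remove_first(s):
--     # return s with the leftmost adjacent cancelling pair removed, or None if none
--     for i in range(len(s) - 1):
--         if _invert_move(s[i + 1]) == s[i]:
--             return s[:i] + s[i + 2:]
--     return None
--
-- def _cancel_moves(seq: list[str]) -> list[str]:
--     cur = list(seq)
--     while True:
--         nxt = _remove_first(cur)
--         if nxt is None:
--             return cur
--         cur = nxt
-- ===== Notes on version B (the rewrite author's own statement) =====
-- stated objective: alternative
-- what changed: Replaces A's single O(n) stack pass with a rewriting fixpoint: repeatedly scan for the leftmost adjacent cancelling pair, delete it, and restart until no pair remains (leftmost strategy makes the fixpoint coincide with the stack result for arbitrary strings).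
import Mathlib
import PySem

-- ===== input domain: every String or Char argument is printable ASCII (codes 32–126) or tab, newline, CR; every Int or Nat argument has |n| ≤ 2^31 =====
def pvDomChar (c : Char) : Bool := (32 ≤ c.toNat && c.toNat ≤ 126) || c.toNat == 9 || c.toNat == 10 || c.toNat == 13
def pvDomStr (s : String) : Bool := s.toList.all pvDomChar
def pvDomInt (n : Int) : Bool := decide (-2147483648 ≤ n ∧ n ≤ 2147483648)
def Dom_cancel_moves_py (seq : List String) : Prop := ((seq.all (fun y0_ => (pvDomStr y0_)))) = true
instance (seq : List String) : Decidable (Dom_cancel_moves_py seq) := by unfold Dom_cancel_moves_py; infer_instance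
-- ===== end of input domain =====

-- B replaces A's single stack pass by a rewriting fixpoint (repeatedly delete the leftmost adjacent
-- cancelling pair until none remains): an alternative algorithm of different structure, same results.


-- ===== PORT A =====
-- _invert_move, shared helper (byte-for-byte identical in A and B).
-- m[0]: m ends with "'", hence nonempty, so pyGet? never returns none; getD "" is unreachable.
def pvInvert (m : String) : String :=
  if PySem.Str.endswith m "2" then m
  else if PySem.Str.endswith m "'" then ((PySem.Str.pyGet? m 0).map (fun c => String.ofList [c])).getD ""
  else m ++ "'"

-- one iteration of A's for-loop: `if out and _invert_move(m) == out[-1]: out.pop() else: out.append(m)`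
def pvStep (out : List String) (m : String) : List String :=
  match out.getLast? with
  | none => out ++ [m]
  | some t => if pvInvert m = t then out.dropLast else out ++ [m]

def cancel_moves_py (seq : List String) : List String :=
  seq.foldl pvStep []

-- ===== PORT B =====
-- _remove_first: scan left to right, drop the first adjacent pair (s[i], s[i+1]) with
-- _invert_move(s[i+1]) == s[i]; none if no such pair exists.
def pvRemoveFirst : List String → Option (List String)
  | a :: b :: t => if pvInvert b = a then some t else (pvRemoveFirst (b :: t)).map (fun r => a :: r)
  | _ => none

-- needed by the port's termination (the while-loop strictly shrinks the list)
theorem pvRemoveFirst_length : ∀ {s r : List String}, pvRemoveFirst s = some r → r.length < s.length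
  | a :: b :: t, r, h => by
    by_cases hc : pvInvert b = a
    · simp [pvRemoveFirst, hc] at h; subst h; simp
    · simp [pvRemoveFirst, hc] at h
      obtain ⟨r', hr', rfl⟩ := h
      have := pvRemoveFirst_length hr'
      simpa using Nat.succ_lt_succ this

-- the while-loop: repeat _remove_first until it returns None
def cancel_moves_py_alt (seq : List String) : List String :=
  match h : pvRemoveFirst seq with
  | some r => cancel_moves_py_alt r
  | none => seq
termination_by seq.length
decreasing_by exact pvRemoveFirst_length h

-- ===== PRECONDITION & SPEC =====
def Spec_cancel_moves_py (seq : List String) (out : List String) : Prop := out = cancel_moves_py_alt seq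
instance (seq : List String) (out : List String) : Decidable (Spec_cancel_moves_py seq out) := by unfold Spec_cancel_moves_py; infer_instance

-- ===== CLAIM (what is proved, stated in full; the proofs are below) =====
def Claim_equal_cancel_moves_py : Prop := ∀ (seq : List String), Dom_cancel_moves_py seq → Spec_cancel_moves_py seq (cancel_moves_py seq)

-- ===== LEMMAS AND PROOFS =====

-- "no adjacent cancelling pair" as a chain predicate
def pvNC (l : List String) : Prop := List.IsChain (fun a b => ¬ pvInvert b = a) l

theorem chain_of_none : ∀ s : List String, pvRemoveFirst s = none → pvNC s
  | [], _ => List.isChain_nil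
  | [a], _ => List.isChain_singleton a
  | a :: b :: t, h => by
    by_cases hc : pvInvert b = a
    · simp [pvRemoveFirst, hc] at h
    · simp [pvRemoveFirst, hc] at h
      have := chain_of_none (b :: t) h
      exact List.isChain_cons_cons.mpr ⟨hc, this⟩

-- if nothing past out can cancel, the stack just appends everything
theorem go_noCancel : ∀ (rest out : List String), pvNC (out ++ rest) →
    List.foldl pvStep out rest = out ++ rest
  | [], out, _ => by simp
  | m :: rest, out, h => by
    have hstep : pvStep out m = out ++ [m] := by
      unfold pvStep
      cases hl : out.getLast? with
      | none => rfl
      | some t =>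
        have hne : ¬ pvInvert m = t := by
          rcases List.isChain_append.mp h with ⟨_, _, hjoin⟩
          exact hjoin t hl m rfl
        simp [hne]
    have h' : pvNC ((out ++ [m]) ++ rest) := by simpa using h
    calc List.foldl pvStep out (m :: rest) = List.foldl pvStep (out ++ [m]) rest := by
            simp [List.foldl, hstep]
      _ = (out ++ [m]) ++ rest := go_noCancel rest (out ++ [m]) h'
      _ = out ++ (m :: rest) := by simp

-- deleting the leftmost cancelling pair does not change the stack result
theorem foldl_some : ∀ (s r out : List String), pvRemoveFirst s = some r →
    (∀ a ∈ s.head?, pvNC (out ++ [a])) →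
    List.foldl pvStep out s = List.foldl pvStep out r
  | a :: b :: t, r, out, h, hchain => by
    have hca : pvNC (out ++ [a]) := hchain a rfl
    have hstep : pvStep out a = out ++ [a] := by
      unfold pvStep
      cases hl : out.getLast? with
      | none => rfl
      | some x =>
        have hne : ¬ pvInvert a = x := by
          rcases List.isChain_append.mp hca with ⟨_, _, hjoin⟩
          exact hjoin x hl a rfl
        simp [hne]
    by_cases hc : pvInvert b = a
    · simp [pvRemoveFirst, hc] at h
      subst h
      have hstep2 : pvStep (out ++ [a]) b = out := by
        unfold pvStep
        simp [hc]
      simp [List.foldl, hstep, hstep2]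
    · simp [pvRemoveFirst, hc] at h
      obtain ⟨r', hr', rfl⟩ := h
      have hchain' : ∀ x ∈ (b :: t).head?, pvNC ((out ++ [a]) ++ [x]) := by
        intro x hx
        simp at hx
        subst hx
        refine List.isChain_append.mpr ⟨hca, List.isChain_singleton _, ?_⟩
        intro y hy z hz
        simp at hy hz
        subst hy; subst hz
        exact hc
      calc List.foldl pvStep out (a :: b :: t)
            = List.foldl pvStep (out ++ [a]) (b :: t) := by simp [List.foldl, hstep]
        _ = List.foldl pvStep (out ++ [a]) r' := foldl_some (b :: t) r' (out ++ [a]) hr' hchain'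
        _ = List.foldl pvStep out (a :: r') := by simp [List.foldl, hstep]

theorem alt_eq : ∀ (s : List String), cancel_moves_py_alt s = List.foldl pvStep [] s
  | s => by
    rw [cancel_moves_py_alt]
    split
    next r h =>
      rw [alt_eq r]
      refine (foldl_some s r [] h ?_).symm
      intro a _
      exact List.isChain_singleton a
    next h =>
      exact (go_noCancel s [] (by simpa [pvNC] using chain_of_none s h)).symm
termination_by s => s.length
decreasing_by exact pvRemoveFirst_length (by assumption)

-- ===== VERDICT (by name: the statement is the Claim_ definition above) =====
theorem cancel_moves_py_spec : Claim_equal_cancel_moves_py := by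
  intro seq _
  unfold Spec_cancel_moves_py cancel_moves_py
  rw [alt_eq]
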